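-- pv_equiv track=rewrite | github.com/choosewhatulike/common-crawl-processing | apply_massivetext_filter.py | is_bad_doc
-- ===== SOURCE A (Python) =====
-- def is_bad_doc(doc, badwords):
--     count = 0
--     for bad_word in badwords:
--         bad_word = bad_word.strip()
--         if bad_word in doc:
--             count += doc.count(bad_word)
--             if count > 3:
--                 return True
--
--     return False
-- ===== SOURCE B (Python) =====
-- def is_bad_doc(doc, badwords):
--     # Group the (stripped) badwords by multiplicity first, then count each
--     # distinct word in the document only once, stopping as soon as the
--     # running grand total exceeds the threshold.
--     counts = {}
--     for w in badwords:
--         w = w.strip()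
--         counts[w] = counts.get(w, 0) + 1
--     total = 0
--     for w, m in counts.items():
--         total += m * doc.count(w)
--         if total > 3:
--             return True
--     return False
-- ===== Notes on version B (the rewrite author's own statement) =====
-- stated objective: alternative
-- what changed: B groups the stripped badwords by multiplicity in a dict first, then counts each distinct word in the document once (multiplying by multiplicity) with an early exit past 3, instead of A's per-entry loop that rescans the document for every badword entry.
import Mathlib
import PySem

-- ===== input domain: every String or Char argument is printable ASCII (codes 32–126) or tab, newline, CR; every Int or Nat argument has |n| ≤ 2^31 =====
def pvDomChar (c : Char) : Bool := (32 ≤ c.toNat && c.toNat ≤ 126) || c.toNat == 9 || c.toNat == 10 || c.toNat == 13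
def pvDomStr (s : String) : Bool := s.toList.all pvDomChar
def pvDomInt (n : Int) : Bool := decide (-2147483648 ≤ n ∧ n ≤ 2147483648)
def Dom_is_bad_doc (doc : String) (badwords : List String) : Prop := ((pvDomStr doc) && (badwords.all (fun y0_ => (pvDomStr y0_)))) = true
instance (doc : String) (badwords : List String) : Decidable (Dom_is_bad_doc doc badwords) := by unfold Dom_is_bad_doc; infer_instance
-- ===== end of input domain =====

-- B deduplicates the stripped badwords into a multiplicity dict so each distinct word is
-- scanned for in the document only once (objective: alternative algorithm, same result).

-- ===== PORT A =====
-- A: per-badword loop keeping a running count, substring pre-test, early return past 3.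
def isBadGoA (doc : String) : List String → Int → Bool
  | [], _ => false
  | bad_word :: rest, count =>
    let b := PySem.Str.strip bad_word
    if PySem.Str.isIn b doc then
      let count' := count + (PySem.Str.count doc b : Int)
      if count' > 3 then true else isBadGoA doc rest count'
    else isBadGoA doc rest count

def is_bad_doc (doc : String) (badwords : List String) : Bool :=
  isBadGoA doc badwords 0

-- ===== PORT B =====
-- B: group the stripped badwords by multiplicity in a dict, count each distinct
-- word in doc once, stop as soon as the running grand total exceeds 3.
def isBadGoB (doc : String) : List (String × Int) → Int → Bool
  | [], _ => false
  | p :: rest, total =>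
    let total' := total + p.2 * (PySem.Str.count doc p.1 : Int)
    if total' > 3 then true else isBadGoB doc rest total'

def is_bad_doc_alt (doc : String) (badwords : List String) : Bool :=
  let counts : PySem.Dict String Int :=
    badwords.foldl (fun d w =>
      let w' := PySem.Str.strip w
      d.insert w' (d.getD w' 0 + 1)) PySem.Dict.empty
  isBadGoB doc counts.items 0

-- ===== PRECONDITION & SPEC =====
def Spec_is_bad_doc (doc : String) (badwords : List String) (out : Bool) : Prop := out = is_bad_doc_alt doc badwords
instance (doc : String) (badwords : List String) (out : Bool) : Decidable (Spec_is_bad_doc doc badwords out) := by unfold Spec_is_bad_doc; infer_instance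

-- ===== CLAIM (what is proved, stated in full; the proofs are below) =====
def Claim_equal_is_bad_doc : Prop := ∀ (doc : String) (badwords : List String), Dom_is_bad_doc doc badwords → Spec_is_bad_doc doc badwords (is_bad_doc doc badwords)

-- ===== LEMMAS AND PROOFS =====

-- an absent pattern is counted zero times (Chars level)
theorem chars_count_go_of_not_infix (sub : List Char) :
    ∀ (fuel : Nat) (l : List Char) (acc : Nat), ¬ sub <:+: l →
      PySem.Chars.count.go sub fuel l acc = acc := by
  intro fuel
  induction fuel with
  | zero => intro l acc _; cases l <;> rfl
  | succ n ih =>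
    intro l acc h
    cases l with
    | nil => rfl
    | cons hd t =>
      rw [PySem.Chars.count.go]
      have hpre : sub.isPrefixOf (hd :: t) = false := by
        by_contra hc
        exact h (List.IsPrefix.isInfix (List.isPrefixOf_iff_prefix.mp (by
          cases hh : sub.isPrefixOf (hd :: t) <;> simp_all)))
      simp only [hpre, Bool.false_eq_true, if_false]
      exact ih t acc (fun ht => h (ht.trans (List.suffix_cons hd t).isInfix))

theorem chars_count_eq_zero (s sub : List Char) (h : PySem.Chars.isIn sub s = false) :
    PySem.Chars.count s sub = 0 := by
  have hinf : ¬ sub <:+: s := by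
    intro hi
    rw [← PySem.Chars.isIn_iff_infix] at hi
    simp [h] at hi
  have hne : sub.isEmpty = false := by
    cases sub with
    | nil => exact absurd List.nil_infix hinf
    | cons a t => rfl
  unfold PySem.Chars.count
  rw [hne]
  simp only [Bool.false_eq_true, if_false]
  exact chars_count_go_of_not_infix sub s.length s 0 hinf

theorem str_count_eq_zero (doc b : String) (h : PySem.Str.isIn b doc = false) :
    PySem.Str.count doc b = 0 := by
  have h' : PySem.Chars.isIn b.toList doc.toList = false := by
    simpa using h
  simpa using chars_count_eq_zero doc.toList b.toList h'

-- the sum A accumulates, as one expression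
def badSum (doc : String) (ws : List String) : Int :=
  (ws.map (fun w => (PySem.Str.count doc (PySem.Str.strip w) : Int))).sum

theorem badSum_nonneg (doc : String) (ws : List String) : 0 ≤ badSum doc ws := by
  apply List.sum_nonneg
  intro x hx
  obtain ⟨w, _, rfl⟩ := List.mem_map.mp hx
  exact Int.natCast_nonneg _

theorem isBadGoA_eq (doc : String) :
    ∀ (ws : List String) (count : Int), 0 ≤ count → count ≤ 3 →
      isBadGoA doc ws count = decide (count + badSum doc ws > 3) := by
  intro ws
  induction ws with
  | nil => intro count _ hle; simp [isBadGoA, badSum]; omega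
  | cons w rest ih =>
    intro count hc hle
    have hrest : 0 ≤ badSum doc rest := badSum_nonneg doc rest
    show (if PySem.Str.isIn (PySem.Str.strip w) doc then _ else _) = _
    have hsum : badSum doc (w :: rest) =
        (PySem.Str.count doc (PySem.Str.strip w) : Int) + badSum doc rest := by
      simp [badSum]
    by_cases hin : PySem.Str.isIn (PySem.Str.strip w) doc
    · simp only [hin, if_true]
      by_cases hgt : count + (PySem.Str.count doc (PySem.Str.strip w) : Int) > 3
      · simp only [hgt, if_pos]
        have : count + badSum doc (w :: rest) > 3 := by rw [hsum]; omega
        simp [this]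
      · simp only [hgt, if_false]
        rw [ih _ (by positivity) (by omega), hsum, add_assoc]
    · simp only [hin, if_false, Bool.false_eq_true]
      rw [ih count hc hle, hsum, str_count_eq_zero doc _ (by simpa using hin)]
      norm_num

-- incrementing one term of a sum over a nodup list
theorem sum_map_add_ite {α : Type} [DecidableEq α] (l : List α) (g : α → Int) (x : α)
    (c : Int) (hx : x ∈ l) (hn : l.Nodup) :
    (l.map (fun k => g k + if k = x then c else 0)).sum = (l.map g).sum + c := by
  induction l with
  | nil => cases hx
  | cons a t ih =>
    rcases List.nodup_cons.mp hn with ⟨hat, hnt⟩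
    by_cases heq : a = x
    · subst heq
      have hmap : t.map (fun k => g k + if k = a then c else 0) = t.map g := by
        apply List.map_congr_left
        intro k hk
        have hka : k ≠ a := fun h => hat (h ▸ hk)
        simp [hka]
      simp only [List.map_cons, List.sum_cons, hmap, if_true]
      ring
    · have hxt : x ∈ t := by
        rcases List.mem_cons.mp hx with h | h
        · exact absurd h.symm heq
        · exact h
      simp only [List.map_cons, List.sum_cons, if_neg heq, ih hxt hnt]
      ring

-- grouping: summing f over the distinct elements weighted by multiplicity = summing f over the list
theorem grouped_sum (ys : List String) (f : String → Int) :
    ((PySem.Set.ofList ys).map (fun k => (ys.count k : Int) * f k)).sum = (ys.map f).sum := by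
  induction ys using List.reverseRecOn with
  | nil => rfl
  | append_singleton ys x ih =>
    have hcnt : ∀ k, ((ys ++ [x]).count k : Int) = (ys.count k : Int) + if k = x then 1 else 0 := by
      intro k
      rw [List.count_append]
      push_cast
      congr 1
      by_cases hk : k = x
      · subst hk; simp
      · have h0 : List.count k [x] = 0 := List.count_eq_zero.mpr (by simp [hk])
        simp [h0, hk]
    rw [PySem.Set.ofList_append_singleton]
    by_cases hmem : x ∈ PySem.Set.ofList ys
    · rw [PySem.Set.add_of_mem hmem]
      have hmapeq : (PySem.Set.ofList ys).map (fun k => ((ys ++ [x]).count k : Int) * f k) =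
          (PySem.Set.ofList ys).map (fun k => (ys.count k : Int) * f k + if k = x then f x else 0) := by
        apply List.map_congr_left
        intro k _
        rw [hcnt k]
        by_cases hk : k = x
        · subst hk; simp; ring_nf
        · simp [hk]
      rw [hmapeq, sum_map_add_ite _ _ x (f x) hmem (PySem.Set.nodup_ofList ys), ih]
      simp
    · rw [PySem.Set.add_of_not_mem hmem]
      have hxys : x ∉ ys := fun h => hmem ((PySem.Set.mem_ofList ys x).mpr h)
      rw [List.map_append, List.sum_append]
      have h1 : (PySem.Set.ofList ys).map (fun k => ((ys ++ [x]).count k : Int) * f k) =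
          (PySem.Set.ofList ys).map (fun k => (ys.count k : Int) * f k) := by
        apply List.map_congr_left
        intro k hk
        have hkx : k ≠ x := fun h => hmem (h ▸ hk)
        rw [hcnt k, if_neg hkx]
        ring
      have h2 : ((ys ++ [x]).count x : Int) * f x = f x := by
        rw [hcnt x, if_pos rfl, List.count_eq_zero.mpr hxys]
        ring
      rw [h1, ih]
      simp only [List.map_cons, List.map_nil, List.sum_cons, List.sum_nil, add_zero, h2,
        List.map_append, List.sum_append]

theorem isBadGoB_eq (doc : String) :
    ∀ (ps : List (String × Int)) (total : Int), (∀ p ∈ ps, 0 ≤ p.2) →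
      0 ≤ total → total ≤ 3 →
      isBadGoB doc ps total =
        decide (total + (ps.map (fun p => p.2 * (PySem.Str.count doc p.1 : Int))).sum > 3) := by
  intro ps
  induction ps with
  | nil => intro total _ _ hle; simp [isBadGoB]; omega
  | cons p rest ih =>
    intro total hnn ht0 ht3
    have hterm : 0 ≤ p.2 * (PySem.Str.count doc p.1 : Int) :=
      mul_nonneg (hnn p (List.mem_cons_self)) (Int.natCast_nonneg _)
    have hrest : 0 ≤ (rest.map (fun p => p.2 * (PySem.Str.count doc p.1 : Int))).sum := by
      apply List.sum_nonneg
      intro x hx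
      obtain ⟨q, hq, rfl⟩ := List.mem_map.mp hx
      exact mul_nonneg (hnn q (List.mem_cons_of_mem _ hq)) (Int.natCast_nonneg _)
    show (if total + p.2 * (PySem.Str.count doc p.1 : Int) > 3 then true
          else isBadGoB doc rest (total + p.2 * (PySem.Str.count doc p.1 : Int))) = _
    simp only [List.map_cons, List.sum_cons]
    by_cases hgt : total + p.2 * (PySem.Str.count doc p.1 : Int) > 3
    · have hbig : total + (p.2 * (PySem.Str.count doc p.1 : Int) +
          (rest.map (fun p => p.2 * (PySem.Str.count doc p.1 : Int))).sum) > 3 := by omega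
      rw [if_pos hgt]
      exact (decide_eq_true hbig).symm
    · simp only [hgt, if_false]
      rw [ih _ (fun q hq => hnn q (List.mem_cons_of_mem _ hq)) (by omega) (by omega), add_assoc]
      rfl

theorem alt_eq (doc : String) (badwords : List String) :
    is_bad_doc_alt doc badwords = decide (badSum doc badwords > 3) := by
  have h1 : (badwords.foldl (fun d w =>
        let w' := PySem.Str.strip w
        d.insert w' (d.getD w' 0 + 1)) (PySem.Dict.empty : PySem.Dict String Int)) =
      PySem.Dict.counter (badwords.map PySem.Str.strip) := by
    rw [← PySem.Dict.foldl_insert_getD_add_one_eq_counter]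
    exact Eq.symm (List.foldl_map (f := PySem.Str.strip)
      (g := fun d x => d.insert x (d.getD x 0 + 1)) (l := badwords)
      (init := (PySem.Dict.empty : PySem.Dict String Int)))
  unfold is_bad_doc_alt
  show isBadGoB doc (badwords.foldl (fun d w =>
      let w' := PySem.Str.strip w
      d.insert w' (d.getD w' 0 + 1)) (PySem.Dict.empty : PySem.Dict String Int)).items 0 = _
  rw [h1, PySem.Dict.items_counter]
  have hnn : ∀ p ∈ (PySem.Set.ofList (badwords.map PySem.Str.strip)).map
      (fun k => (k, ((badwords.map PySem.Str.strip).count k : Int))), 0 ≤ p.2 := by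
    intro p hp
    obtain ⟨k, _, rfl⟩ := List.mem_map.mp hp
    exact Int.natCast_nonneg _
  rw [isBadGoB_eq doc _ 0 hnn le_rfl (by norm_num), List.map_map, zero_add]
  simp only [Function.comp_def]
  rw [decide_eq_decide]
  rw [grouped_sum (badwords.map PySem.Str.strip) (fun k => (PySem.Str.count doc k : Int))]
  unfold badSum
  rw [List.map_map]
  simp only [Function.comp_def]

-- ===== VERDICT (by name: the statement is the Claim_ definition above) =====
theorem is_bad_doc_spec : Claim_equal_is_bad_doc := by
  intro doc badwords _
  unfold Spec_is_bad_doc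
  show isBadGoA doc badwords 0 = _
  rw [isBadGoA_eq doc badwords 0 le_rfl (by norm_num), alt_eq]
  norm_num
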